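-- pv_equiv track=rewrite | github.com/nickhayeck/qal | main.py | sectioner
-- ===== SOURCE A (Python) =====
-- def sectioner(inputfile):
--     progFlag, regFlag = False, False
--     progFlagUsed, regFlagUsed = False, False
--     regout, progout = [],[]
--     labels = ['.prog','.reg']
--
--     for line in inputfile:
--
--         if regFlag:
--            regout.append(line.strip())
--         if progFlag:
--             progout.append(line.strip())
--
--
--         if line.strip() == ".reg":
--             if regFlagUsed:
--                 raise Exception("Register flag used multiple times")
--             progFlag, regFlag = False, True
--             regFlagUsed = True
--
--
--         if line.strip() == ".prog":
--             if progFlagUsed: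
--                 raise Exception("Program flag used multiple times")
--             progFlag, regFlag = True, False
--             progFlagUsed = True
--
--     return [[i for i in regout if i and i not in labels],[i for i in progout if i and i not in labels]]
-- ===== SOURCE B (Python) =====
-- def sectioner(inputfile):
--     lines = [l.strip() for l in inputfile]
--     seen = set()
--     for l in lines:
--         if l in (".reg", ".prog") and l in seen:
--             raise Exception(("Register" if l == ".reg" else "Program") + " flag used multiple times")
--         seen.add(l)
--     reg_i = lines.index(".reg") if ".reg" in lines else None
--     prog_i = lines.index(".prog") if ".prog" in lines else None
--     def section(m, o):
--         if m is None:
--             return []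
--         end = o if (o is not None and o > m) else len(lines)
--         return [l for l in lines[m + 1:end] if l]
--     return [section(reg_i, prog_i), section(prog_i, reg_i)]
-- ===== Notes on version B (the rewrite author's own statement) =====
-- stated objective: alternative
-- what changed: B replaces A's single stateful scan with mutable section flags by locating the first index of each '.reg'/'.prog' marker and slicing the stripped line list between a marker and the next marker (or the end), filtering empty lines; the flag-state machine and the label filter disappear.
import Mathlib
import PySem

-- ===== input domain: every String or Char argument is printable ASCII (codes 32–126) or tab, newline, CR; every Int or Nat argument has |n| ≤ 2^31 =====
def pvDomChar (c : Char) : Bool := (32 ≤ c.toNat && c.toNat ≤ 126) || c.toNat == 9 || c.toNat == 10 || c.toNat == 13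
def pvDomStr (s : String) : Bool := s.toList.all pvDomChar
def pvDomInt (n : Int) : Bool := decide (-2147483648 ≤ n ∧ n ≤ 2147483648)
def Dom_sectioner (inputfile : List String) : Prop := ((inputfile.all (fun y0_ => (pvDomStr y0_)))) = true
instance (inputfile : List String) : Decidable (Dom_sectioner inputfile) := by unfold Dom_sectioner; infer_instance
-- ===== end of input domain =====

-- B replaces A's stateful flag-driven scan by locating the two marker indices and slicing; same O(n) cost, different decomposition (objective: alternative).

-- ===== PORT A =====
-- loop body of A's for-loop (applied to line.strip(); flag updates are the two sequential ifs of A)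
def sectionerStep (acc : Bool × Bool × List String × List String) (s : String) :
    Bool × Bool × List String × List String :=
  let regout := if acc.2.1 then acc.2.2.1 ++ [s] else acc.2.2.1
  let progout := if acc.1 then acc.2.2.2 ++ [s] else acc.2.2.2
  -- on a duplicate ".reg"/".prog" Python raises; such inputs lie outside Pre_sectioner
  let fl1 : Bool × Bool := if s == ".reg" then (false, true) else (acc.1, acc.2.1)
  let fl2 : Bool × Bool := if s == ".prog" then (true, false) else fl1
  (fl2.1, fl2.2, regout, progout)

def sectioner (inputfile : List String) : List (List String) :=
  let labels : List String := [".prog", ".reg"]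
  let st := inputfile.foldl (fun acc line => sectionerStep acc (PySem.Str.strip line))
      (false, false, [], [])
  [st.2.2.1.filter (fun i => i != "" && !(labels.contains i)),
   st.2.2.2.filter (fun i => i != "" && !(labels.contains i))]

-- ===== PORT B =====
-- Source B's local helper `section(m, o)`
def sectionB (lines : List String) (m o : Option Nat) : List String :=
  match m with
  | none => []
  | some i =>
    let e : Int := match o with
      | some j => if (i : Int) < (j : Int) then (j : Int) else (lines.length : Int)
      | none => (lines.length : Int)
    (PySem.List.slice lines (some ((i : Int) + 1)) (some e)).filter (fun l => l != "")

def sectioner_alt (inputfile : List String) : List (List String) :=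
  let lines := inputfile.map PySem.Str.strip
  -- Source B's duplicate-marker scan only raises (never changes the result); raising inputs lie outside Pre_sectioner
  let reg_i := PySem.List.index? lines ".reg"
  let prog_i := PySem.List.index? lines ".prog"
  [sectionB lines reg_i prog_i, sectionB lines prog_i reg_i]

-- ===== PRECONDITION & SPEC =====
-- Pre_ excludes exactly the inputs on which A raises: a stripped ".reg" or ".prog" marker occurring more than once.
def Pre_sectioner (inputfile : List String) : Prop :=
  (inputfile.map PySem.Str.strip).count ".reg" ≤ 1 ∧
  (inputfile.map PySem.Str.strip).count ".prog" ≤ 1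
instance (inputfile : List String) : Decidable (Pre_sectioner inputfile) := by
  unfold Pre_sectioner; infer_instance

def pvWitness_sectioner : List String := ["x", " .reg ", "a 1", "", ".prog", "b 2"]

def Spec_sectioner (inputfile : List String) (out : List (List String)) : Prop := out = sectioner_alt inputfile
instance (inputfile : List String) (out : List (List String)) : Decidable (Spec_sectioner inputfile out) := by unfold Spec_sectioner; infer_instance

-- ===== CLAIM (what is proved, stated in full; the proofs are below) =====
def Claim_equal_sectioner : Prop := ∀ (inputfile : List String), Dom_sectioner inputfile → Pre_sectioner inputfile → Spec_sectioner inputfile (sectioner inputfile)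

-- ===== LEMMAS AND PROOFS =====

-- spec-level recursion computing what A's loop appends from a given flag state
def gsec : List String → Bool → Bool → List String × List String
  | [], _, _ => ([], [])
  | s :: ts, pf, rf =>
    let fl : Bool × Bool :=
      if s == ".reg" then (false, true) else if s == ".prog" then (true, false) else (pf, rf)
    let rest := gsec ts fl.1 fl.2
    ((if rf then s :: rest.1 else rest.1), (if pf then s :: rest.2 else rest.2))

theorem foldA_eq_gsec : ∀ (t : List String) (pf rf : Bool) (r p : List String),
    (t.foldl sectionerStep (pf, rf, r, p)).2.2 =
      (r ++ (gsec t pf rf).1, p ++ (gsec t pf rf).2) := by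
  intro t
  induction t with
  | nil => intro pf rf r p; simp [gsec]
  | cons s ts ih =>
    intro pf rf r p
    by_cases h1 : s = ".reg"
    · subst h1
      simp only [List.foldl_cons, sectionerStep, gsec, ih]
      cases rf <;> cases pf <;> simp
    · by_cases h2 : s = ".prog"
      · subst h2
        simp only [List.foldl_cons, sectionerStep, gsec, ih]
        cases rf <;> cases pf <;> simp
      · simp only [List.foldl_cons, sectionerStep, gsec, ih,
          beq_iff_eq, h1, h2, if_false]
        cases rf <;> cases pf <;> simp [h1, h2]

theorem gsec_ft_no_markers (t : List String) (hr : ".reg" ∉ t) (hp : ".prog" ∉ t) :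
    gsec t false true = (t, []) := by
  induction t with
  | nil => simp [gsec]
  | cons s ts ih =>
    simp only [List.mem_cons, not_or] at hr hp
    simp [gsec, Ne.symm hr.1, Ne.symm hp.1, ih hr.2 hp.2]

theorem gsec_tf_no_markers (t : List String) (hr : ".reg" ∉ t) (hp : ".prog" ∉ t) :
    gsec t true false = ([], t) := by
  induction t with
  | nil => simp [gsec]
  | cons s ts ih =>
    simp only [List.mem_cons, not_or] at hr hp
    simp [gsec, Ne.symm hr.1, Ne.symm hp.1, ih hr.2 hp.2]

theorem gsec_ff_prefix (a t : List String) (hr : ".reg" ∉ a) (hp : ".prog" ∉ a) :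
    gsec (a ++ t) false false = gsec t false false := by
  induction a with
  | nil => simp
  | cons s as ih =>
    simp only [List.mem_cons, not_or] at hr hp
    simp [gsec, Ne.symm hr.1, Ne.symm hp.1, ih hr.2 hp.2]

theorem gsec_ft_split (c d : List String) (hr : ".reg" ∉ c) (hrd : ".reg" ∉ d)
    (hpc : ".prog" ∉ c) (hpd : ".prog" ∉ d) :
    gsec (c ++ ".prog" :: d) false true = (c ++ [".prog"], d) := by
  induction c with
  | nil => simp [gsec, gsec_tf_no_markers d hrd hpd]
  | cons s cs ih =>
    simp only [List.mem_cons, not_or] at hr hpc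
    simp [gsec, Ne.symm hr.1, Ne.symm hpc.1, ih hr.2 hpc.2]

theorem gsec_tf_split (c d : List String) (hpc : ".prog" ∉ c) (hpd : ".prog" ∉ d)
    (hrc : ".reg" ∉ c) (hrd : ".reg" ∉ d) :
    gsec (c ++ ".reg" :: d) true false = (d, c ++ [".reg"]) := by
  induction c with
  | nil => simp [gsec, gsec_ft_no_markers d hrd hpd]
  | cons s cs ih =>
    simp only [List.mem_cons, not_or] at hrc hpc
    simp [gsec, Ne.symm hrc.1, Ne.symm hpc.1, ih hpc.2 hrc.2]

theorem filter_labels_of_no_markers (l : List String) (hr : ".reg" ∉ l) (hp : ".prog" ∉ l) :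
    l.filter (fun i => i != "" && !([".prog", ".reg"].contains i)) = l.filter (fun i => i != "") := by
  apply List.filter_congr
  intro x hx
  have h1 : x ≠ ".reg" := fun h => hr (h ▸ hx)
  have h2 : x ≠ ".prog" := fun h => hp (h ▸ hx)
  simp [h1, h2]

theorem slice_succ_natCast (xs : List String) (i e : Nat) :
    PySem.List.slice xs (some ((i : Int) + 1)) (some ((e : Nat) : Int)) =
      (xs.drop (i + 1)).take (e - (i + 1)) := by
  have : ((i : Int) + 1) = (((i + 1 : Nat)) : Int) := by push_cast; ring
  rw [this, PySem.List.slice_natCast]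

theorem drop_cons_append {α : Type} (pre suf : List α) (x : α) :
    (pre ++ x :: suf).drop (pre.length + 1) = suf := by
  rw [show pre ++ x :: suf = (pre ++ [x]) ++ suf by simp,
      show pre.length + 1 = (pre ++ [x]).length by simp, List.drop_left]

theorem take_len_append {α : Type} (c rest : List α) : (c ++ rest).take c.length = c := by
  simp

theorem main_eq (t : List String) (hr1 : t.count ".reg" ≤ 1) (hp1 : t.count ".prog" ≤ 1) :
    [((gsec t false false).1).filter (fun i => i != "" && !([".prog", ".reg"].contains i)),
     ((gsec t false false).2).filter (fun i => i != "" && !([".prog", ".reg"].contains i))] =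
    [sectionB t (PySem.List.index? t ".reg") (PySem.List.index? t ".prog"),
     sectionB t (PySem.List.index? t ".prog") (PySem.List.index? t ".reg")] := by
  by_cases hrm : ".reg" ∈ t
  · -- ".reg" occurs: first-occurrence decomposition
    obtain ⟨k, hk⟩ := Option.isSome_iff_exists.mp ((PySem.List.index?_isSome_iff t ".reg").mpr hrm)
    obtain ⟨a, b, hta, hlen, hra⟩ := (PySem.List.index?_eq_some_iff t _ k).mp hk
    have hrb : ".reg" ∉ b := by
      rw [← List.count_eq_zero]
      have := hta ▸ hr1
      simp [List.count_append] at this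
      omega
    by_cases hpm : ".prog" ∈ t
    · subst hlen
      by_cases hpa : ".prog" ∈ a
      · -- ".prog" strictly before the ".reg"
        obtain ⟨m, hm⟩ := Option.isSome_iff_exists.mp ((PySem.List.index?_isSome_iff a ".prog").mpr hpa)
        obtain ⟨c, e, hace, hmlen, hpc⟩ := (PySem.List.index?_eq_some_iff a _ m).mp hm
        have hta' : t = c ++ ".prog" :: (e ++ ".reg" :: b) := by simp [hta, hace]
        have hcnt := hta' ▸ hp1
        simp [List.count_append] at hcnt
        have hpe : ".prog" ∉ e ∧ ".prog" ∉ b := by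
          constructor <;> rw [← List.count_eq_zero] <;> omega
        have hrc : ".reg" ∉ c := fun h => hra (hace ▸ List.mem_append.mpr (Or.inl h))
        have hre : ".reg" ∉ e := fun h => hra (hace ▸ (by simp [h]))
        have hpj : PySem.List.index? t ".prog" = some c.length :=
          (PySem.List.index?_eq_some_iff t _ c.length).mpr ⟨c, e ++ ".reg" :: b, hta', rfl, hpc⟩
        have hklen : a.length = c.length + 1 + e.length := by simp [hace]; omega
        have hg : gsec t false false = (b, e ++ [".reg"]) := by
          rw [hta', gsec_ff_prefix c _ hrc hpc]
          simpa [gsec] using gsec_tf_split e b hpe.1 hpe.2 hre hrb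
        have hsr : sectionB t (some a.length) (some c.length) = b.filter (fun l => l != "") := by
          simp only [sectionB]
          rw [if_neg (by exact_mod_cast by omega), slice_succ_natCast]
          rw [hta, drop_cons_append]
          have : (a ++ ".reg" :: b).length - (a.length + 1) = b.length := by simp; omega
          rw [this, List.take_length]
        have hsp : sectionB t (some c.length) (some a.length) = e.filter (fun l => l != "") := by
          simp only [sectionB]
          rw [if_pos (by exact_mod_cast by omega), slice_succ_natCast]
          rw [hta', drop_cons_append]
          have : a.length - (c.length + 1) = e.length := by omega
          rw [this, take_len_append]
        rw [hk, hpj, hg, hsr, hsp, List.filter_append,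
            filter_labels_of_no_markers e hre hpe.1, filter_labels_of_no_markers b hrb hpe.2]
        simp
      · -- ".reg" strictly before the ".prog"
        have hpb : ".prog" ∈ b := by
          have h := hta ▸ hpm
          rw [List.mem_append, List.mem_cons] at h
          rcases h with h | h | h
          · exact absurd h hpa
          · exact absurd h (by decide)
          · exact h
        obtain ⟨m, hm⟩ := Option.isSome_iff_exists.mp ((PySem.List.index?_isSome_iff b ".prog").mpr hpb)
        obtain ⟨c, d, hbcd, hmlen, hpc⟩ := (PySem.List.index?_eq_some_iff b _ m).mp hm
        have hta' : t = (a ++ ".reg" :: c) ++ ".prog" :: d := by simp [hta, hbcd]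
        have hpd : ".prog" ∉ d := by
          rw [← List.count_eq_zero]; have := hta' ▸ hp1
          simp [List.count_append] at this; omega
        have hrc : ".reg" ∉ c := fun h => hrb (hbcd ▸ List.mem_append.mpr (Or.inl h))
        have hrd : ".reg" ∉ d := fun h => hrb (hbcd ▸ (by simp [h]))
        have hpj : PySem.List.index? t ".prog" = some (a ++ ".reg" :: c).length :=
          (PySem.List.index?_eq_some_iff t _ _).mpr ⟨a ++ ".reg" :: c, d, hta', rfl,
            by rw [List.mem_append, List.mem_cons]; push Not; exact ⟨hpa, by decide, hpc⟩⟩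
        have hjlen : (a ++ ".reg" :: c).length = a.length + 1 + c.length := by simp; omega
        have hg : gsec t false false = (c ++ [".prog"], d) := by
          rw [hta, hbcd, gsec_ff_prefix a _ hra hpa]
          simpa [gsec] using gsec_ft_split c d hrc hrd hpc hpd
        have hsr : sectionB t (some a.length) (some (a ++ ".reg" :: c).length) =
            c.filter (fun l => l != "") := by
          simp only [sectionB]
          rw [if_pos (by exact_mod_cast by omega), slice_succ_natCast]
          rw [hta, hbcd, drop_cons_append]
          have : (a ++ ".reg" :: c).length - (a.length + 1) = c.length := by omega
          rw [this, take_len_append]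
        have hsp : sectionB t (some (a ++ ".reg" :: c).length) (some a.length) =
            d.filter (fun l => l != "") := by
          simp only [sectionB]
          rw [if_neg (by exact_mod_cast by omega), slice_succ_natCast]
          rw [hta', drop_cons_append]
          have : ((a ++ ".reg" :: c) ++ ".prog" :: d).length - ((a ++ ".reg" :: c).length + 1) =
              d.length := by simp; omega
          rw [this, List.take_length]
        rw [hk, hpj, hg, hsr, hsp, List.filter_append,
            filter_labels_of_no_markers c hrc hpc, filter_labels_of_no_markers d hrd hpd]
        simp
    · -- only ".reg"
      have hpn : PySem.List.index? t ".prog" = none := (PySem.List.index?_eq_none_iff t ".prog").mpr hpm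
      have hpa : ".prog" ∉ a := fun h => hpm (hta ▸ (List.mem_append.mpr (Or.inl h)))
      have hpb : ".prog" ∉ b := fun h => hpm (hta ▸ (by simp [h]))
      have hg : gsec t false false = (b, []) := by
        rw [hta, gsec_ff_prefix a _ hra hpa]
        simpa [gsec] using gsec_ft_no_markers b hrb hpb
      have hslice : sectionB t (some k) none = b.filter (fun l => l != "") := by
        simp only [sectionB, slice_succ_natCast, ← hlen]
        rw [hta, drop_cons_append]
        have : (a ++ ".reg" :: b).length - (a.length + 1) = b.length := by simp; omega
        rw [this, List.take_length]
      rw [hk, hpn, hg, hslice, filter_labels_of_no_markers b hrb hpb]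
      simp [sectionB]
  · have hrn : PySem.List.index? t ".reg" = none := (PySem.List.index?_eq_none_iff t ".reg").mpr hrm
    by_cases hpm : ".prog" ∈ t
    · -- only ".prog"
      obtain ⟨k, hk⟩ := Option.isSome_iff_exists.mp ((PySem.List.index?_isSome_iff t ".prog").mpr hpm)
      obtain ⟨a, b, hta, hlen, hpa⟩ := (PySem.List.index?_eq_some_iff t _ k).mp hk
      have hpb : ".prog" ∉ b := by
        rw [← List.count_eq_zero]
        have := hta ▸ hp1
        simp [List.count_append] at this
        omega
      have hra : ".reg" ∉ a := fun h => hrm (hta ▸ (List.mem_append.mpr (Or.inl h)))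
      have hrb : ".reg" ∉ b := fun h => hrm (hta ▸ (by simp [h]))
      have hg : gsec t false false = ([], b) := by
        rw [hta, gsec_ff_prefix a _ hra hpa]
        simpa [gsec] using gsec_tf_no_markers b hrb hpb
      have hslice : sectionB t (some k) none = b.filter (fun l => l != "") := by
        simp only [sectionB, slice_succ_natCast, ← hlen]
        rw [hta, drop_cons_append]
        have : (a ++ ".prog" :: b).length - (a.length + 1) = b.length := by simp; omega
        rw [this, List.take_length]
      rw [hk, hrn, hg, hslice, filter_labels_of_no_markers b hrb hpb]
      simp [sectionB]
    · -- no markers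
      have hpn : PySem.List.index? t ".prog" = none := (PySem.List.index?_eq_none_iff t ".prog").mpr hpm
      have hg : gsec t false false = ([], []) := by
        simpa using gsec_ff_prefix t [] hrm hpm
      rw [hrn, hpn, hg]
      simp [sectionB]

-- ===== VERDICT (by name: the statement is the Claim_ definition above) =====
theorem sectioner_spec : Claim_equal_sectioner := by
  intro inputfile _ hpre
  unfold Pre_sectioner at hpre
  show sectioner inputfile = sectioner_alt inputfile
  simp only [sectioner, sectioner_alt]
  rw [← List.foldl_map (f := PySem.Str.strip) (g := sectionerStep)]
  have h22 := foldA_eq_gsec (inputfile.map PySem.Str.strip) false false [] []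
  have h1 : ((inputfile.map PySem.Str.strip).foldl sectionerStep
      (false, false, [], [])).2.2.1 = (gsec (inputfile.map PySem.Str.strip) false false).1 := by
    rw [h22]; simp
  have h2 : ((inputfile.map PySem.Str.strip).foldl sectionerStep
      (false, false, [], [])).2.2.2 = (gsec (inputfile.map PySem.Str.strip) false false).2 := by
    rw [h22]; simp
  rw [h1, h2]
  exact main_eq (inputfile.map PySem.Str.strip) hpre.1 hpre.2
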